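-- pv_equiv track=rewrite | github.com/Pranav322/deepdoc | deepdoc/generator_v2.py | _extract_model_snippets
-- ===== SOURCE A (Python) =====
-- def _extract_model_snippets(content: str, model_names: list[str]) -> str:
--     """Extract model class definitions from source for database context."""
--     if not model_names:
--         return ""
--
--     src_lines = content.splitlines()
--     snippets: list[str] = []
--     total_chars = 0
--     max_chars = 15_000
--
--     for model_name in model_names:
--         if total_chars >= max_chars:
--             break
--         # Find class definition
--         for i, line in enumerate(src_lines):
--             if f"class {model_name}" in line:
--                 # Grab up to 40 lines of the class body
--                 end = min(i + 40, len(src_lines))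
--                 block = "\n".join(src_lines[i:end])
--                 snippets.append(block)
--                 total_chars += len(block)
--                 break
--
--     return "\n\n".join(snippets)
-- ===== SOURCE B (Python) =====
-- def _extract_model_snippets(content: str, model_names: list[str]) -> str:
--     """Single pass over the source lines: record the first line index per model,
--     then assemble the snippets in model order under the character budget."""
--     if not model_names:
--         return ""
--
--     src_lines = content.splitlines()
--     pending = list(dict.fromkeys(model_names))
--     first_idx: dict[str, int] = {}
--
--     for i, line in enumerate(src_lines):
--         if not pending:
--             break
--         still = []
--         for m in pending:
--             if f"class {m}" in line:
--                 first_idx[m] = i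
--             else:
--                 still.append(m)
--         pending = still
--
--     snippets: list[str] = []
--     total = 0
--     for m in model_names:
--         if total >= 15_000:
--             break
--         if m in first_idx:
--             i = first_idx[m]
--             block = "\n".join(src_lines[i:i + 40])
--             snippets.append(block)
--             total += len(block)
--
--     return "\n\n".join(snippets)
-- ===== Notes on version B (the rewrite author's own statement) =====
-- stated objective: faster
-- what changed: A rescans all source lines from the start for every model name; B makes a single pass over the lines, recording the first matching line index per model in a dict (dropping models once found), then assembles the snippets in model order under the same character budget.
import Mathlib
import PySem

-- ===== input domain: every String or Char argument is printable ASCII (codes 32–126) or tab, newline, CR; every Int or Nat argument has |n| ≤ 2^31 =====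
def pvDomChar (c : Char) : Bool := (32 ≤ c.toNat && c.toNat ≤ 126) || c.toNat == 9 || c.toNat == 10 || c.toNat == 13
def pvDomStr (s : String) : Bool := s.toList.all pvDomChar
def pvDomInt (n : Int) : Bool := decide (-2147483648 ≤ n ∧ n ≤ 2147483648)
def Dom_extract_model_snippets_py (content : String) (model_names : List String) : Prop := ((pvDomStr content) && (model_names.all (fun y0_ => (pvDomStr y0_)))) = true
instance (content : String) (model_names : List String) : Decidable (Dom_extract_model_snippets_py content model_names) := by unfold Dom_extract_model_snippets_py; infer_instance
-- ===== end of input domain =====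

-- B replaces A's per-model rescan of all source lines by one pass over the lines recording
-- the first matching line index per model in a dict, then assembling in model order (objective: faster).

-- ===== PORT A =====
-- inner loop: 'for i, line in enumerate(src_lines): if f"class {model_name}" in line: … break'
def pvAInner (pairs : List (Int × String)) (m : String) (srcLines : List String)
    (snippets : List String) (total : Int) : List String × Int :=
  match pairs with
  | [] => (snippets, total)
  | (i, line) :: rest =>
    if PySem.Str.isIn ("class " ++ m) line then
      let endI := min (i + 40) (PySem.List.len srcLines)
      let block := PySem.Str.join "\n" (PySem.List.slice srcLines (some i) (some endI))
      (snippets ++ [block], total + PySem.Str.len block)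
    else
      pvAInner rest m srcLines snippets total

-- outer loop: 'for model_name in model_names: if total_chars >= max_chars: break; …'
def pvAOuter (names : List String) (srcLines : List String)
    (snippets : List String) (total : Int) : List String :=
  match names with
  | [] => snippets
  | m :: rest =>
    if total ≥ 15000 then snippets
    else
      let st := pvAInner (PySem.List.enumerate srcLines 0) m srcLines snippets total
      pvAOuter rest srcLines st.1 st.2

def extract_model_snippets_py (content : String) (model_names : List String) : String :=
  if model_names = [] then ""
  else
    let srcLines := PySem.Str.splitlines content
    PySem.Str.join "\n\n" (pvAOuter model_names srcLines [] 0)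

-- ===== PORT B =====
-- 'for m in pending: if f"class {m}" in line: first_idx[m] = i else: still.append(m)'
def pvBLine (pending : List String) (line : String) (i : Int)
    (idx : PySem.Dict String Int) : PySem.Dict String Int × List String :=
  pending.foldl
    (fun st m =>
      if PySem.Str.isIn ("class " ++ m) line then (st.1.insert m i, st.2)
      else (st.1, st.2 ++ [m]))
    (idx, [])

-- 'for i, line in enumerate(src_lines): if not pending: break; …'
def pvBScan (lines : List String) (i : Int) (pending : List String)
    (idx : PySem.Dict String Int) : PySem.Dict String Int :=
  match lines with
  | [] => idx
  | line :: rest =>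
    if pending = [] then idx
    else
      let st := pvBLine pending line i idx
      pvBScan rest (i + 1) st.2 st.1

-- 'for m in model_names: if total >= 15000: break; if m in first_idx: …'
def pvBAssemble (names : List String) (srcLines : List String)
    (idx : PySem.Dict String Int) (snippets : List String) (total : Int) : List String :=
  match names with
  | [] => snippets
  | m :: rest =>
    if total ≥ 15000 then snippets
    else
      match idx.get? m with
      | some i =>
        let block := PySem.Str.join "\n" (PySem.List.slice srcLines (some i) (some (i + 40)))
        pvBAssemble rest srcLines idx (snippets ++ [block]) (total + PySem.Str.len block)
      | none => pvBAssemble rest srcLines idx snippets total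

def extract_model_snippets_py_alt (content : String) (model_names : List String) : String :=
  if model_names = [] then ""
  else
    let srcLines := PySem.Str.splitlines content
    let idx := pvBScan srcLines 0 (PySem.List.dedup model_names) PySem.Dict.empty
    PySem.Str.join "\n\n" (pvBAssemble model_names srcLines idx [] 0)

-- ===== PRECONDITION & SPEC =====
def Spec_extract_model_snippets_py (content : String) (model_names : List String) (out : String) : Prop := out = extract_model_snippets_py_alt content model_names
instance (content : String) (model_names : List String) (out : String) : Decidable (Spec_extract_model_snippets_py content model_names out) := by unfold Spec_extract_model_snippets_py; infer_instance

-- ===== CLAIM (what is proved, stated in full; the proofs are below) =====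
def Claim_equal_extract_model_snippets_py : Prop := ∀ (content : String) (model_names : List String), Dom_extract_model_snippets_py content model_names → Spec_extract_model_snippets_py content model_names (extract_model_snippets_py content model_names)

-- ===== LEMMAS AND PROOFS =====

theorem pvBLine_snd_aux (pending : List String) (line : String) (i : Int)
    (d : PySem.Dict String Int) (acc : List String) :
    (pending.foldl (fun st m =>
      if PySem.Str.isIn ("class " ++ m) line then (st.1.insert m i, st.2)
      else (st.1, st.2 ++ [m])) (d, acc)).2 =
      acc ++ pending.filter (fun m => !PySem.Str.isIn ("class " ++ m) line) := by
  induction pending generalizing d acc with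
  | nil => simp
  | cons x rest ih =>
    rw [List.foldl_cons]
    cases hx : PySem.Str.isIn ("class " ++ x) line with
    | true =>
      rw [if_pos rfl, ih, List.filter_cons_of_neg (by simp only [hx]; decide)]
    | false =>
      rw [if_neg (by decide), ih, List.filter_cons_of_pos (by simp only [hx]; decide)]
      simp

theorem pvBLine_get?_aux (pending : List String) (line : String) (i : Int)
    (d : PySem.Dict String Int) (acc : List String) (m : String) :
    ((pending.foldl (fun st m =>
      if PySem.Str.isIn ("class " ++ m) line then (st.1.insert m i, st.2)
      else (st.1, st.2 ++ [m])) (d, acc)).1).get? m =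
      if m ∈ pending ∧ PySem.Str.isIn ("class " ++ m) line = true then some i else d.get? m := by
  induction pending generalizing d acc with
  | nil => simp
  | cons x rest ih =>
    rw [List.foldl_cons]
    cases hx : PySem.Str.isIn ("class " ++ x) line with
    | true =>
      rw [if_pos rfl, ih, PySem.Dict.get?_insert]
      by_cases h1 : m ∈ rest ∧ PySem.Str.isIn ("class " ++ m) line = true
      · rw [if_pos h1, if_pos ⟨List.mem_cons_of_mem _ h1.1, h1.2⟩]
      · rw [if_neg h1]
        by_cases hm : m = x
        · subst hm
          rw [if_pos rfl, if_pos ⟨List.mem_cons_self, hx⟩]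
        · rw [if_neg hm]
          have hn : ¬(m ∈ x :: rest ∧ PySem.Str.isIn ("class " ++ m) line = true) := by
            rintro ⟨hmem, hml⟩
            rcases List.mem_cons.mp hmem with h | h
            · exact hm h
            · exact h1 ⟨h, hml⟩
          rw [if_neg hn]
    | false =>
      rw [if_neg (by decide), ih]
      by_cases h1 : m ∈ rest ∧ PySem.Str.isIn ("class " ++ m) line = true
      · rw [if_pos h1, if_pos ⟨List.mem_cons_of_mem _ h1.1, h1.2⟩]
      · have hn : ¬(m ∈ x :: rest ∧ PySem.Str.isIn ("class " ++ m) line = true) := by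
          rintro ⟨hmem, hml⟩
          rcases List.mem_cons.mp hmem with h | h
          · subst h; rw [hx] at hml; exact Bool.false_ne_true hml
          · exact h1 ⟨h, hml⟩
        rw [if_neg h1, if_neg hn]

theorem pvBLine_snd (pending : List String) (line : String) (i : Int)
    (idx : PySem.Dict String Int) :
    (pvBLine pending line i idx).2 =
      pending.filter (fun m => !PySem.Str.isIn ("class " ++ m) line) := by
  have h := pvBLine_snd_aux pending line i idx []
  rw [List.nil_append] at h
  exact h

theorem pvBLine_get? (pending : List String) (line : String) (i : Int)
    (idx : PySem.Dict String Int) (m : String) :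
    (pvBLine pending line i idx).1.get? m =
      if m ∈ pending ∧ PySem.Str.isIn ("class " ++ m) line = true then some i
      else idx.get? m :=
  pvBLine_get?_aux pending line i idx [] m

theorem pvBScan_get?_not_mem (lines : List String) (i : Int) (pending : List String)
    (idx : PySem.Dict String Int) (m : String) (hm : m ∉ pending) :
    (pvBScan lines i pending idx).get? m = idx.get? m := by
  induction lines generalizing i pending idx with
  | nil => rfl
  | cons line rest ih =>
    rw [pvBScan]
    by_cases hp : pending = []
    · rw [if_pos hp]
    · have hnot2 : m ∉ (pvBLine pending line i idx).2 := by
        rw [pvBLine_snd]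
        intro hmem
        exact hm (List.mem_filter.mp hmem).1
      rw [if_neg hp, ih _ _ _ hnot2, pvBLine_get?, if_neg (fun hc => hm hc.1)]

theorem pvBScan_get?_mem (lines : List String) (i : Int) (pending : List String)
    (idx : PySem.Dict String Int) (m : String) (hm : m ∈ pending) :
    (pvBScan lines i pending idx).get? m =
      match lines.findIdx? (fun l => PySem.Str.isIn ("class " ++ m) l) with
      | some k => some (i + k)
      | none => idx.get? m := by
  induction lines generalizing i pending idx with
  | nil => simp [pvBScan]
  | cons line rest ih =>
    have hp : pending ≠ [] := List.ne_nil_of_mem hm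
    rw [pvBScan, if_neg hp]
    cases hml : PySem.Str.isIn ("class " ++ m) line with
    | true =>
      have hnot : m ∉ (pvBLine pending line i idx).2 := by
        rw [pvBLine_snd]
        intro hmem
        have h2 := (List.mem_filter.mp hmem).2
        rw [hml] at h2
        exact absurd h2 (by decide)
      rw [pvBScan_get?_not_mem _ _ _ _ _ hnot, pvBLine_get?, if_pos ⟨hm, hml⟩]
      simp only [List.findIdx?_cons, hml]
      simp
    | false =>
      have hmem2 : m ∈ (pvBLine pending line i idx).2 := by
        rw [pvBLine_snd]
        exact List.mem_filter.mpr ⟨hm, by rw [hml]; rfl⟩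
      rw [ih _ _ _ hmem2, pvBLine_get?,
        if_neg (fun hc => by rw [hml] at hc; exact Bool.false_ne_true hc.2)]
      simp only [List.findIdx?_cons, hml, Bool.false_eq_true, if_false]
      cases hfi : rest.findIdx? (fun l => PySem.Str.isIn ("class " ++ m) l) with
      | some k => simp only [Option.map_some]; congr 1; push_cast; ring
      | none => simp only [Option.map_none]

theorem pvAInner_eq (lines : List String) (s : Int) (m : String) (srcLines : List String)
    (snippets : List String) (total : Int) :
    pvAInner (PySem.List.enumerate lines s) m srcLines snippets total =
      match lines.findIdx? (fun l => PySem.Str.isIn ("class " ++ m) l) with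
      | some k =>
        let block := PySem.Str.join "\n"
          (PySem.List.slice srcLines (some (s + k)) (some (min (s + k + 40) (PySem.List.len srcLines))))
        (snippets ++ [block], total + PySem.Str.len block)
      | none => (snippets, total) := by
  induction lines generalizing s with
  | nil => simp [PySem.List.enumerate_nil, pvAInner]
  | cons line rest ih =>
    rw [PySem.List.enumerate_cons, pvAInner]
    cases hml : PySem.Str.isIn ("class " ++ m) line with
    | true =>
      rw [if_pos rfl]
      simp only [List.findIdx?_cons, hml]
      simp
    | false =>
      rw [if_neg (by decide), ih]
      simp only [List.findIdx?_cons, hml, Bool.false_eq_true, if_false]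
      cases hfi : rest.findIdx? (fun l => PySem.Str.isIn ("class " ++ m) l) with
      | some k =>
        simp only [Option.map_some]
        rw [show s + 1 + (k : Int) = s + ((k + 1 : Nat) : Int) by push_cast; ring]
      | none => simp only [Option.map_none]

theorem pv_slice_min (srcLines : List String) (i : Int) (h : 0 ≤ i) :
    PySem.List.slice srcLines (some i) (some (min (i + 40) (PySem.List.len srcLines))) =
      PySem.List.slice srcLines (some i) (some (i + 40)) := by
  have hb : PySem.List.clampIdx srcLines.length (min (i + 40) (srcLines.length : Int)) =
      PySem.List.clampIdx srcLines.length (i + 40) := by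
    unfold PySem.List.clampIdx
    split_ifs <;> omega
  simp [PySem.List.slice, PySem.List.len, hb]

theorem pvOuter_eq (names srcLines : List String) (idx : PySem.Dict String Int)
    (h : ∀ m ∈ names, idx.get? m =
      (srcLines.findIdx? (fun l => PySem.Str.isIn ("class " ++ m) l)).map (fun k => (k : Int)))
    (snippets : List String) (total : Int) :
    pvAOuter names srcLines snippets total = pvBAssemble names srcLines idx snippets total := by
  induction names generalizing snippets total with
  | nil => rfl
  | cons m rest ih =>
    rw [pvAOuter, pvBAssemble]
    by_cases ht : total ≥ 15000
    · rw [if_pos ht, if_pos ht]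
    · rw [if_neg ht, if_neg ht]
      have hrest : ∀ m' ∈ rest, idx.get? m' =
          (srcLines.findIdx? (fun l => PySem.Str.isIn ("class " ++ m') l)).map (fun k => (k : Int)) :=
        fun m' hm' => h m' (List.mem_cons_of_mem _ hm')
      have hidx := h m List.mem_cons_self
      rw [pvAInner_eq]
      cases hfi : srcLines.findIdx? (fun l => PySem.Str.isIn ("class " ++ m) l) with
      | some k =>
        rw [hfi] at hidx
        simp only [hidx]
        rw [show (0 : Int) + (k : Int) = (k : Int) by ring,
          pv_slice_min srcLines (k : Int) (Int.natCast_nonneg k)]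
        exact ih hrest _ _
      | none =>
        rw [hfi] at hidx
        simp only [hidx]
        exact ih hrest _ _

-- ===== VERDICT (by name: the statement is the Claim_ definition above) =====
theorem extract_model_snippets_py_spec : Claim_equal_extract_model_snippets_py := by
  intro content model_names _
  unfold Spec_extract_model_snippets_py extract_model_snippets_py extract_model_snippets_py_alt
  by_cases h : model_names = []
  · simp [h]
  · simp only [if_neg h]
    congr 1
    apply pvOuter_eq
    intro m hm
    rw [pvBScan_get?_mem _ _ _ _ _ (by simpa [PySem.List.mem_dedup] using hm)]
    cases hfi : (PySem.Str.splitlines content).findIdx?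
        (fun l => PySem.Str.isIn ("class " ++ m) l) <;>
      simp [PySem.Dict.get?_empty]
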